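-- pv_equiv track=rewrite | github.com/jvargas2/team0-project | features/acid_features.py | get_overall_hydrophobicity
-- ===== SOURCE A (Python) =====
-- PHOBIC_ACIDS = ["G", "A", "V", "L", "I", "P", "F", "M", "W", "C", "Y"]
--
-- PHILIC_ACIDS = ["R", "N", "D", "Q", "E", "H", "K", "S", "T"]
--
-- def get_overall_hydrophobicity(sequence):
--     overall_hydrophobicity = 0
--     for acid in sequence:
--         if acid in PHILIC_ACIDS:
--             overall_hydrophobicity += 1
--         elif acid in PHOBIC_ACIDS:
--             overall_hydrophobicity -= 1
--     return overall_hydrophobicity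
-- ===== SOURCE B (Python) =====
-- from collections import Counter
--
-- PHOBIC_ACIDS = ["G", "A", "V", "L", "I", "P", "F", "M", "W", "C", "Y"]
--
-- PHILIC_ACIDS = ["R", "N", "D", "Q", "E", "H", "K", "S", "T"]
--
-- def get_overall_hydrophobicity(sequence):
--     counts = Counter(sequence)
--     return sum(counts[a] for a in PHILIC_ACIDS) - sum(counts[a] for a in PHOBIC_ACIDS)
-- ===== Notes on version B (the rewrite author's own statement) =====
-- stated objective: idiomatic
-- what changed: Replaces the signed per-residue scan (with list membership tests per char) by a Counter frequency table built once, then sums tallies by iterating over the fixed acid alphabets instead of the sequence.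
import Mathlib
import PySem

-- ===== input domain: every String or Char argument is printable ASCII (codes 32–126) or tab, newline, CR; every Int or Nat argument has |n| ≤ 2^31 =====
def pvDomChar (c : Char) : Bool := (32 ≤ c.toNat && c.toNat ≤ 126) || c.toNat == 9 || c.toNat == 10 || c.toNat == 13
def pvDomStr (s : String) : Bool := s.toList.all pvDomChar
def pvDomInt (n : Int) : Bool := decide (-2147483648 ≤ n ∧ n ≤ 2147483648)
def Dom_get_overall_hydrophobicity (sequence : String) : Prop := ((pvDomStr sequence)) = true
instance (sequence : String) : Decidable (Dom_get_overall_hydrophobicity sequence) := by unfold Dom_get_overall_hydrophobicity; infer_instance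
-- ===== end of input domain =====

-- B is the same exact score computed from a Counter frequency table traversed by the fixed acid alphabets (idiomatic); A's per-residue signed scan is reproduced exactly.

-- ===== PORT A =====
def PHOBIC_ACIDS : List Char := ['G', 'A', 'V', 'L', 'I', 'P', 'F', 'M', 'W', 'C', 'Y']

def PHILIC_ACIDS : List Char := ['R', 'N', 'D', 'Q', 'E', 'H', 'K', 'S', 'T']

def get_overall_hydrophobicity (sequence : String) : Int :=
  sequence.toList.foldl (fun overall_hydrophobicity acid =>
    if PHILIC_ACIDS.contains acid then overall_hydrophobicity + 1
    else if PHOBIC_ACIDS.contains acid then overall_hydrophobicity - 1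
    else overall_hydrophobicity) 0

-- ===== PORT B =====
def get_overall_hydrophobicity_alt (sequence : String) : Int :=
  let counts := PySem.Dict.counter sequence.toList
  (PHILIC_ACIDS.map (fun a => counts.getD a 0)).sum
    - (PHOBIC_ACIDS.map (fun a => counts.getD a 0)).sum

-- ===== PRECONDITION & SPEC =====
def Spec_get_overall_hydrophobicity (sequence : String) (out : Int) : Prop := out = get_overall_hydrophobicity_alt sequence
instance (sequence : String) (out : Int) : Decidable (Spec_get_overall_hydrophobicity sequence out) := by unfold Spec_get_overall_hydrophobicity; infer_instance

-- ===== CLAIM (what is proved, stated in full; the proofs are below) =====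
def Claim_equal_get_overall_hydrophobicity : Prop := ∀ (sequence : String), Dom_get_overall_hydrophobicity sequence → Spec_get_overall_hydrophobicity sequence (get_overall_hydrophobicity sequence)

-- ===== LEMMAS AND PROOFS =====

/-- Sum, over a fixed alphabet `L`, of the occurrence counts in `l`. -/
def countSum (L l : List Char) : Int := (L.map (fun a => (l.count a : Int))).sum

theorem sum_indicator (L : List Char) (hL : L.Nodup) (c : Char) :
    (L.map (fun a => if (c == a) = true then (1 : Int) else 0)).sum
      = if L.contains c then 1 else 0 := by
  induction L with
  | nil => simp
  | cons a L ih =>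
    rcases List.nodup_cons.mp hL with ⟨ha, hL'⟩
    have ihv := ih hL'
    simp only [List.map_cons, List.sum_cons, List.contains_cons, ihv]
    by_cases hac : c = a
    · subst hac
      simpa using ha
    · have h1 : (c == a) = false := by simp [hac]
      simp [h1]

theorem countSum_cons (L : List Char) (hL : L.Nodup) (c : Char) (l : List Char) :
    countSum L (c :: l) = countSum L l + (if L.contains c then 1 else 0) := by
  rw [← sum_indicator L hL c]
  simp only [countSum, List.count_cons, Nat.cast_add, Nat.cast_ite, Nat.cast_one, Nat.cast_zero]
  rw [← PySem.List.sum_map_add_int]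

theorem philic_not_phobic (c : Char) (h : PHILIC_ACIDS.contains c = true) :
    PHOBIC_ACIDS.contains c = false := by
  rw [List.contains_iff_mem] at h
  fin_cases h <;> decide

theorem foldl_score (l : List Char) (acc : Int) :
    l.foldl (fun overall_hydrophobicity acid =>
      if PHILIC_ACIDS.contains acid then overall_hydrophobicity + 1
      else if PHOBIC_ACIDS.contains acid then overall_hydrophobicity - 1
      else overall_hydrophobicity) acc
    = acc + countSum PHILIC_ACIDS l - countSum PHOBIC_ACIDS l := by
  induction l generalizing acc with
  | nil => simp [countSum]
  | cons c l ih =>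
    have hphi : PHILIC_ACIDS.Nodup := by decide
    have hpho : PHOBIC_ACIDS.Nodup := by decide
    rw [List.foldl_cons, ih, countSum_cons _ hphi, countSum_cons _ hpho]
    by_cases h1 : c ∈ PHILIC_ACIDS
    · have h2 : c ∉ PHOBIC_ACIDS := by
        have := philic_not_phobic c (by simpa [List.contains_iff_mem] using h1)
        simpa [List.contains_iff_mem] using this
      simp [h1, h2]
      ring
    · by_cases h2 : c ∈ PHOBIC_ACIDS
      · simp [h1, h2]
        ring
      · simp [h1, h2]

-- ===== VERDICT (by name: the statement is the Claim_ definition above) =====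
theorem get_overall_hydrophobicity_spec : Claim_equal_get_overall_hydrophobicity := by
  intro sequence _
  unfold Spec_get_overall_hydrophobicity get_overall_hydrophobicity get_overall_hydrophobicity_alt
  rw [foldl_score]
  simp [PySem.Dict.getD_counter, countSum]
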